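-- pv_equiv track=rewrite | github.com/SantosJGND/Galaxy_KDE_classifier | Downstream_functions/JapanKorea_tropical_Rdist/StructE_tools.py | Org_comb
-- ===== SOURCE A (Python) =====
-- def Org_comb(L,Dict_diff):
--     Set = {a:[0] for a in range(L-1)}
--     for unit in Set.keys():
--         start = sum(range(L-unit,L))
--         end = start + (L-unit) -1
--         for St in range(start,end):
--             Set[unit].append(Dict_diff[St])
--     Set[L] = [0]
--     return [x for x in Set.values()]
-- ===== SOURCE B (Python) =====
-- def Org_comb(L, Dict_diff):
--     # Single forward sweep: fetch the consecutively-indexed values once, then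
--     # chunk them into rows of decreasing length n, n-1, ..., 1, plus a final [0].
--     n = L - 1 if L > 1 else 0
--     total = n * (n + 1) // 2
--     vals = [Dict_diff[i] for i in range(total)]
--     out = []
--     k = n
--     while k > 0:
--         out.append([0] + vals[:k])
--         vals = vals[k:]
--         k -= 1
--     out.append([0])
--     return out
-- ===== Notes on version B (the rewrite author's own statement) =====
-- stated objective: simpler
-- what changed: Instead of building a dict of rows and recomputing start = sum(range(L-unit,L)) for every unit, B exploits that the accessed indices are consecutive: it fetches Dict_diff[0..n(n+1)/2-1] once in a single forward sweep and then chunks that flat list into rows of decreasing length, appending the trailing [0].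
import Mathlib
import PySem

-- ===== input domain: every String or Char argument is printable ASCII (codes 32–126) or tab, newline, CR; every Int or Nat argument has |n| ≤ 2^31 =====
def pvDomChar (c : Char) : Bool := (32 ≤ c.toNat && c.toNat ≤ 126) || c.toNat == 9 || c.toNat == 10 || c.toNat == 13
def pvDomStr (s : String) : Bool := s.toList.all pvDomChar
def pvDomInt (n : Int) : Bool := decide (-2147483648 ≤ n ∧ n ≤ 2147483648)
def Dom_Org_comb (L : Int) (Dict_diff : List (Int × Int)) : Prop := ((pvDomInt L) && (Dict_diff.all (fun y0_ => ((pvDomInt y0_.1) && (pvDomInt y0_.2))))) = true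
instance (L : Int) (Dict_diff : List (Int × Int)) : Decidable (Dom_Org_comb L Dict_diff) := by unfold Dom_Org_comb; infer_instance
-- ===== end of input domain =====

-- B replaces A's dict-of-rows (with a per-row index sum) by a single consecutive fetch
-- of Dict_diff[0..n(n+1)/2-1] chunked into rows of decreasing length (objective: simpler).

-- ===== PORT A =====
-- Dict_diff[St] raises KeyError when the key is absent; Pre_ excludes exactly those
-- inputs, so the .getD default below is never reached on admitted inputs.
def Org_comb (L : Int) (Dict_diff : List (Int × Int)) : List (List Int) :=
  let set0 : PySem.Dict Int (List Int) :=
    (PySem.List.pyRange 0 (L - 1) 1).foldl (fun d a => d.insert a [0]) PySem.Dict.empty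
  let set1 : PySem.Dict Int (List Int) :=
    (PySem.Dict.keys set0).foldl (fun d unit =>
      let start := (PySem.List.pyRange (L - unit) L 1).foldl (· + ·) 0
      let stop := start + (L - unit) - 1
      (PySem.List.pyRange start stop 1).foldl
        (fun d2 St =>
          -- Set[unit].append(x): the key 'unit' is always present, so modify's default [] is unused
          d2.modify unit [] (fun row => row ++ [(PySem.Dict.get? (PySem.Dict.mk Dict_diff) St).getD 0])) d) set0
  let set2 := set1.insert L [0]
  set2.values

-- ===== PORT B =====
def pvChunk : Nat → List Int → List (List Int)
  | 0, _ => [[0]]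
  | k+1, vals => ((0 : Int) :: vals.take (k+1)) :: pvChunk k (vals.drop (k+1))

def Org_comb_alt (L : Int) (Dict_diff : List (Int × Int)) : List (List Int) :=
  let n := (L - 1).toNat
  let total := n * (n + 1) / 2
  let vals := (List.range total).map (fun i : Nat => (PySem.Dict.get? (PySem.Dict.mk Dict_diff) (i : Int)).getD 0)
  pvChunk n vals

-- ===== PRECONDITION & SPEC =====
-- A raises KeyError unless Dict_diff has every key 0 .. n(n+1)/2 - 1 (n = max(L-1,0)),
-- exactly the indices both programs access; Pre_ excludes only those raising inputs.
-- (The 'min … Dict_diff.length' bound is redundant given the first conjunct — covering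
-- that many distinct keys forces length ≥ n(n+1)/2 — and only keeps the check small.)
def Pre_Org_comb (L : Int) (Dict_diff : List (Int × Int)) : Prop :=
  (L - 1).toNat * ((L - 1).toNat + 1) / 2 ≤ Dict_diff.length ∧
  ∀ i ∈ List.range (min ((L - 1).toNat * ((L - 1).toNat + 1) / 2) Dict_diff.length),
    (PySem.Dict.get? (PySem.Dict.mk Dict_diff) (i : Int)).isSome = true
instance (L : Int) (Dict_diff : List (Int × Int)) : Decidable (Pre_Org_comb L Dict_diff) := by
  unfold Pre_Org_comb; infer_instance

def pvWitness_Org_comb : Int × (List (Int × Int)) := (3, [(0, 5), (1, 6), (2, 7)])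

def Spec_Org_comb (L : Int) (Dict_diff : List (Int × Int)) (out : List (List Int)) : Prop := out = Org_comb_alt L Dict_diff
instance (L : Int) (Dict_diff : List (Int × Int)) (out : List (List Int)) : Decidable (Spec_Org_comb L Dict_diff out) := by unfold Spec_Org_comb; infer_instance

-- ===== CLAIM (what is proved, stated in full; the proofs are below) =====
def Claim_equal_Org_comb : Prop := ∀ (L : Int) (Dict_diff : List (Int × Int)), Dom_Org_comb L Dict_diff → Pre_Org_comb L Dict_diff → Spec_Org_comb L Dict_diff (Org_comb L Dict_diff)

-- ===== LEMMAS AND PROOFS =====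

-- the value both ports fetch at index i
def fD (D : List (Int × Int)) (i : Int) : Int := (PySem.Dict.get? (PySem.Dict.mk D) i).getD 0
def gD (D : List (Int × Int)) (j : Nat) : Int := fD D (j : Int)

-- rows of lengths k, k-1, …, 1 (each prefixed by 0) reading indices from s on, then [0]
def rowsRec (g : Nat → Int) : Nat → Nat → List (List Int)
  | 0, _ => [[0]]
  | k+1, s => ((0 : Int) :: (List.range' s (k+1)).map g) :: rowsRec g k (s + (k+1))

theorem tri_succ (k : Nat) : (k + 1) * (k + 1 + 1) / 2 = (k + 1) + k * (k + 1) / 2 := by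
  obtain ⟨m, hm⟩ := (Nat.even_mul_succ_self k).two_dvd
  have h2 : (k + 1) * (k + 1 + 1) = 2 * ((k + 1) + m) := by nlinarith
  omega

theorem chunk_seg (g : Nat → Int) : ∀ (k s : Nat),
    pvChunk k ((List.range' s (k * (k + 1) / 2)).map g) = rowsRec g k s := by
  intro k
  induction k with
  | zero => intro s; rfl
  | succ k ih =>
      intro s
      rw [tri_succ, ← List.range'_append_1, List.map_append]
      have hlen : ((List.range' s (k + 1)).map g).length = k + 1 := by simp
      simp only [pvChunk, rowsRec, List.take_left' hlen, List.drop_left' hlen, ih]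

-- ---- A-side abbreviations ----

def startSum (L u : Int) : Int := (PySem.List.pyRange (L - u) L 1).foldl (· + ·) 0

def stepA (L : Int) (D : List (Int × Int)) (d : PySem.Dict Int (List Int)) (unit : Int) :
    PySem.Dict Int (List Int) :=
  (PySem.List.pyRange (startSum L unit) (startSum L unit + (L - unit) - 1) 1).foldl
    (fun d2 St => d2.modify unit [] (fun row => row ++ [fD D St])) d

def rowVals (L : Int) (D : List (Int × Int)) (u : Int) : List Int :=
  (PySem.List.pyRange (startSum L u) (startSum L u + (L - u) - 1) 1).map (fD D)

theorem foldl_add_int : ∀ (l : List Int) (a b : Int),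
    l.foldl (· + ·) (a + b) = a + l.foldl (· + ·) b := by
  intro l
  induction l with
  | nil => intro a b; rfl
  | cons x l ih => intro a b; simpa [add_assoc] using ih a (b + x)

theorem startSum_zero (L : Int) : startSum L 0 = 0 := by
  rw [startSum, PySem.List.pyRange_one_eq_nil (by omega : L ≤ L - 0)]; rfl

theorem startSum_succ (L u : Int) (h0 : 0 ≤ u) :
    startSum L (u + 1) = startSum L u + (L - u - 1) := by
  have hc : L - (u + 1) < L := by omega
  unfold startSum
  rw [PySem.List.pyRange_one_cons hc, show L - (u + 1) + 1 = L - u by omega, List.foldl_cons]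
  have h := foldl_add_int (PySem.List.pyRange (L - u) L 1) (L - (u + 1)) 0
  rw [show (0 : Int) + (L - (u + 1)) = L - (u + 1) + 0 by ring, h]
  omega

-- ---- inner loop (one unit's appends) ----

theorem contains_inner (D : List (Int × Int)) (u k : Int) :
    ∀ (l : List Int) (d : PySem.Dict Int (List Int)), d.contains u = true →
    (l.foldl (fun d2 St => d2.modify u [] (fun row => row ++ [fD D St])) d).contains k
      = d.contains k := by
  intro l
  induction l with
  | nil => intro d _; rfl
  | cons x l ih =>
      intro d hc
      rw [List.foldl_cons, ih _ (by rw [PySem.Dict.contains_modify]; simp),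
        PySem.Dict.contains_modify]
      by_cases hk : k = u
      · simp [hk, hc]
      · simp [hk]

theorem keys_inner (D : List (Int × Int)) (u : Int) :
    ∀ (l : List Int) (d : PySem.Dict Int (List Int)), d.contains u = true →
    (l.foldl (fun d2 St => d2.modify u [] (fun row => row ++ [fD D St])) d).keys = d.keys := by
  intro l
  induction l with
  | nil => intro d _; rfl
  | cons x l ih =>
      intro d hc
      rw [List.foldl_cons, ih _ (by rw [PySem.Dict.contains_modify]; simp),
        PySem.Dict.keys_modify, PySem.Dict.keys_insert_of_contains _ _ hc]

theorem getD_inner_self (D : List (Int × Int)) (u : Int) :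
    ∀ (l : List Int) (d : PySem.Dict Int (List Int)),
    (l.foldl (fun d2 St => d2.modify u [] (fun row => row ++ [fD D St])) d).getD u []
      = d.getD u [] ++ l.map (fD D) := by
  intro l
  induction l with
  | nil => intro d; simp
  | cons x l ih =>
      intro d
      rw [List.foldl_cons, ih, PySem.Dict.getD_modify_self]
      simp

theorem getD_inner_ne (D : List (Int × Int)) (u k : Int) (hk : k ≠ u) :
    ∀ (l : List Int) (d : PySem.Dict Int (List Int)),
    (l.foldl (fun d2 St => d2.modify u [] (fun row => row ++ [fD D St])) d).getD k []
      = d.getD k [] := by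
  intro l
  induction l with
  | nil => intro d; rfl
  | cons x l ih =>
      intro d
      rw [List.foldl_cons, ih, PySem.Dict.getD_modify_of_ne _ _ _ hk]

-- ---- outer loop ----

theorem contains_outer (L : Int) (D : List (Int × Int)) (k : Int) :
    ∀ (us : List Int) (d : PySem.Dict Int (List Int)), (∀ u ∈ us, d.contains u = true) →
    (us.foldl (stepA L D) d).contains k = d.contains k := by
  intro us
  induction us with
  | nil => intro d _; rfl
  | cons u us ih =>
      intro d hc
      have hcu : d.contains u = true := hc u (by simp)
      rw [List.foldl_cons, ih _ (fun v hv => by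
          rw [stepA, contains_inner D u v _ d hcu]; exact hc v (by simp [hv])),
        stepA, contains_inner D u k _ d hcu]

theorem keys_outer (L : Int) (D : List (Int × Int)) :
    ∀ (us : List Int) (d : PySem.Dict Int (List Int)), (∀ u ∈ us, d.contains u = true) →
    (us.foldl (stepA L D) d).keys = d.keys := by
  intro us
  induction us with
  | nil => intro d _; rfl
  | cons u us ih =>
      intro d hc
      have hcu : d.contains u = true := hc u (by simp)
      rw [List.foldl_cons, ih _ (fun v hv => by
          rw [stepA, contains_inner D u v _ d hcu]; exact hc v (by simp [hv])),
        stepA, keys_inner D u _ d hcu]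

theorem getD_outer_ne (L : Int) (D : List (Int × Int)) (k : Int) :
    ∀ (us : List Int) (d : PySem.Dict Int (List Int)), k ∉ us →
    (us.foldl (stepA L D) d).getD k [] = d.getD k [] := by
  intro us
  induction us with
  | nil => intro d _; rfl
  | cons u us ih =>
      intro d hk
      rw [List.foldl_cons, ih _ (fun h => hk (List.mem_cons_of_mem _ h)), stepA,
        getD_inner_ne D u k (fun h => hk (by simp [h]))]

theorem map_getD_outer (L : Int) (D : List (Int × Int)) :
    ∀ (us : List Int) (d : PySem.Dict Int (List Int)), us.Nodup →
    us.map (fun u => (us.foldl (stepA L D) d).getD u [])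
      = us.map (fun u => d.getD u [] ++ rowVals L D u) := by
  intro us
  induction us with
  | nil => intro d _; rfl
  | cons u us ih =>
      intro d hnd
      have hu : u ∉ us := (List.nodup_cons.mp hnd).1
      rw [List.map_cons, List.map_cons, List.foldl_cons]
      congr 1
      · rw [getD_outer_ne L D u us _ hu, stepA, getD_inner_self]
        rfl
      · rw [ih (stepA L D d u) (List.nodup_cons.mp hnd).2]
        exact List.map_congr_left (fun v hv => by
          rw [stepA, getD_inner_ne D u v (fun h => hu (h ▸ hv))])

-- ---- the merged statement: A's values list in closed row form ----

theorem rows_eq (L : Int) (D : List (Int × Int)) :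
    ∀ (k u s : Nat), ((u : Int) + k = L - 1) → startSum L u = (s : Int) →
    ((List.range' u k).map (fun j : Nat => (0 : Int) :: rowVals L D (j : Int))) ++ [[0]]
      = rowsRec (gD D) k s := by
  intro k
  induction k with
  | zero => intro u s _ _; rfl
  | succ k ih =>
      intro u s hk hs
      rw [List.range'_succ, List.map_cons, rowsRec]
      have hrow : rowVals L D (u : Int) = (List.range' s (k+1)).map (gD D) := by
        rw [rowVals, hs, PySem.List.pyRange_one]
        rw [show (s : Int) + (L - u) - 1 - s = (k + 1 : Nat) by push_cast; omega, Int.toNat_natCast]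
        rw [List.range'_eq_map_range, List.map_map, List.map_map]
        exact List.map_congr_left (fun j _ => by simp [gD, Function.comp, fD])
      rw [List.cons_append, hrow]
      congr 1
      exact ih (u + 1) (s + (k + 1)) (by push_cast; push_cast at hk; omega)
        (by
          have := startSum_succ L u (by positivity)
          push_cast
          rw [show ((u : Int) + 1) = (u : Int) + 1 by rfl] at this
          rw [this, hs]
          push_cast at hk ⊢
          omega)

theorem A_values (L : Int) (D : List (Int × Int)) :
    Org_comb L D = ((PySem.List.pyRange 0 (L - 1) 1).map
        (fun u => (0 : Int) :: rowVals L D u)) ++ [[0]] := by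
  have hstep : Org_comb L D =
      (((PySem.Dict.keys ((PySem.List.pyRange 0 (L - 1) 1).foldl
            (fun d (a : Int) => d.insert a ([0] : List Int)) PySem.Dict.empty)).foldl
          (stepA L D)
          ((PySem.List.pyRange 0 (L - 1) 1).foldl
            (fun d (a : Int) => d.insert a ([0] : List Int)) PySem.Dict.empty)).insert
        L [0]).values := rfl
  set units := PySem.List.pyRange 0 (L - 1) 1 with hunits
  set S0 := units.foldl (fun d (a : Int) => d.insert a ([0] : List Int)) PySem.Dict.empty with hS0
  have hnd : units.Nodup := PySem.List.nodup_pyRange_one _ _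
  have h_items0 : S0.items = units.map (fun a => (a, ([0] : List Int))) := by
    have := PySem.Dict.items_foldl_insert_fresh units (fun a : Int => a)
      (fun _ => ([0] : List Int)) PySem.Dict.empty
      (fun a _ => PySem.Dict.contains_empty a) (by simpa using hnd)
    simpa using this
  have h_keys0 : S0.keys = units := by
    have hk : S0.keys = S0.items.map Prod.fst := rfl
    rw [hk, h_items0, List.map_map]
    have hid : (Prod.fst ∘ fun a : Int => (a, ([0] : List Int))) = id := rfl
    rw [hid, List.map_id]
  have hc0 : ∀ u ∈ units, S0.contains u = true := fun u hu =>
    (PySem.Dict.contains_iff_mem_keys S0 u).mpr (h_keys0 ▸ hu)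
  have hgetD0 : ∀ u ∈ units, S0.getD u [] = [0] := fun u hu =>
    PySem.Dict.getD_of_mem_items S0
      (h_items0 ▸ List.mem_map_of_mem hu) (h_keys0 ▸ hnd) []
  set S1 := units.foldl (stepA L D) S0 with hS1
  have h_keys1 : S1.keys = units := by rw [hS1, keys_outer L D units S0 hc0, h_keys0]
  have h_containsL : S1.contains L = false := by
    have h1 : S1.contains L = S0.contains L := contains_outer L D L units S0 hc0
    rw [h1]
    by_contra hne
    have : S0.contains L = true := by revert hne; cases h : S0.contains L <;> simp
    have hmem := (PySem.Dict.contains_iff_mem_keys S0 L).mp this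
    rw [h_keys0, hunits] at hmem
    have := (PySem.List.mem_pyRange_one).mp hmem
    omega
  have hval2 : (S1.insert L [0]).values = S1.values ++ [[0]] := by
    have hv : ∀ (d : PySem.Dict Int (List Int)), d.values = d.items.map Prod.snd := fun _ => rfl
    rw [hv, PySem.Dict.items_insert_of_not_contains S1 [0] h_containsL, List.map_append, ← hv]
    rfl
  have h_values1 : S1.values = units.map (fun u => S1.getD u []) := by
    rw [PySem.Dict.values_eq_map_keys S1 (h_keys1 ▸ hnd) [], h_keys1]
  have hmap : units.map (fun u => S1.getD u []) = units.map (fun u => (0 : Int) :: rowVals L D u) := by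
    rw [hS1, map_getD_outer L D units S0 hnd]
    exact List.map_congr_left (fun u hu => by rw [hgetD0 u hu]; rfl)
  rw [hstep, h_keys0, hval2, h_values1, hmap]

theorem B_rows (L : Int) (D : List (Int × Int)) :
    Org_comb_alt L D = rowsRec (gD D) (L - 1).toNat 0 := by
  show pvChunk (L - 1).toNat
      ((List.range ((L - 1).toNat * ((L - 1).toNat + 1) / 2)).map (gD D))
    = rowsRec (gD D) (L - 1).toNat 0
  rw [List.range_eq_range', chunk_seg]

theorem Org_comb_spec : Claim_equal_Org_comb := by
  intro L D _ _
  unfold Spec_Org_comb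
  rw [A_values, B_rows]
  by_cases hL : L ≤ 0
  · rw [PySem.List.pyRange_one_eq_nil (by omega : L - 1 ≤ 0),
      show (L - 1).toNat = 0 by omega]
    rfl
  · have hn : ((L - 1).toNat : Int) = L - 1 := Int.toNat_of_nonneg (by omega)
    have hu : PySem.List.pyRange 0 (L - 1) 1
        = (List.range' 0 (L - 1).toNat).map (fun j : Nat => (j : Int)) := by
      rw [PySem.List.pyRange_one, ← List.range_eq_range']
      simp
    rw [hu, List.map_map]
    have := rows_eq L D (L - 1).toNat 0 0 (by push_cast [hn]; omega) (startSum_zero L)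
    rw [← this]
    rfl
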